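-- pv_equiv track=rewrite | github.com/equalsraf/python-icecc | python-icecc/icecc/util.py | parse_internals
-- ===== SOURCE A (Python) =====
-- def parse_internals(lines):
--     """
--     Takes a list of output lines from the "internals" command
--     and turns it into a host indexed dictionary
--     """
--     internals = {}
--     key = None
--     for line in lines:
--         if line.startswith("Node"):
--             key = line.split()[2]
--             internals[key] = []
--             continue
--         elif not key:
--             continue
--
--         args = line.split(":", 1)
--         if len(args) != 2:
--             args = line.split("=", 1)
--         if len(args) != 2:
--             continue
--
--         internals[key].append( (args[0].strip(), args[1].strip()) )
--
--     return internals
-- ===== SOURCE B (Python) =====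
-- def _parse_line(line):
--     args = line.split(":", 1)
--     if len(args) != 2:
--         args = line.split("=", 1)
--     if len(args) != 2:
--         return None
--     return (args[0].strip(), args[1].strip())
--
--
-- def parse_internals(lines):
--     """
--     Takes a list of output lines from the "internals" command
--     and turns it into a host indexed dictionary
--     """
--     # Phase 1: cut the input into blocks, one per "Node" header line,
--     # discarding anything before the first header.
--     result = {}
--     i = 0
--     n = len(lines)
--     while i < n and not lines[i].startswith("Node"):
--         i += 1
--     while i < n:
--         key = lines[i].split()[2]
--         i += 1
--         body = []
--         while i < n and not lines[i].startswith("Node"):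
--             body.append(lines[i])
--             i += 1
--         # Phase 2: parse the block's body; later blocks with the same
--         # key overwrite earlier ones (matching the reset behaviour).
--         result[key] = [p for p in map(_parse_line, body) if p is not None]
--     return result
-- ===== Notes on version B (the rewrite author's own statement) =====
-- stated objective: alternative
-- what changed: Replaces A's single stateful scan (current-key variable, per-line dict append) with a block decomposition: skip lines before the first 'Node' header, cut the input into header-delimited blocks, parse each block's body with a separate line-parsing helper, and assign whole blocks into the dict so duplicate keys keep the last block.
import Mathlib
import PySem

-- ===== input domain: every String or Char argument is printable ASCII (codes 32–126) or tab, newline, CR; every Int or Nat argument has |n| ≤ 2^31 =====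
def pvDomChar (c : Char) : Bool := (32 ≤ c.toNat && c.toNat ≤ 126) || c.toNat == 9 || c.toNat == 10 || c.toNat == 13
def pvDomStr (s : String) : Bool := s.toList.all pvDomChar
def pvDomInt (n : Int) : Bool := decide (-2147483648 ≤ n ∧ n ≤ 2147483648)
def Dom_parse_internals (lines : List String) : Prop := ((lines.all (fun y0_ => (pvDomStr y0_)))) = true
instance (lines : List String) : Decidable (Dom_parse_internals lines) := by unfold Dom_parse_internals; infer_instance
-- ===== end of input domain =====

-- B re-implements A's single stateful scan as a block decomposition (split at "Node"
-- headers, parse each body with a helper, assign whole blocks); same cost, alternative structure.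

-- ===== PORT A =====
-- A's loop: state = (internals dict, current key). `elif not key` is the key-is-None
-- check here: once set, key comes from line.split() whose words are never empty.
def pvALoop : List String → PySem.Dict String (List (String × String)) → Option String →
    Option (PySem.Dict String (List (String × String)))
  | [], d, _ => some d
  | line :: rest, d, key =>
    if PySem.Str.startswith line "Node" then
      match PySem.List.pyGet? (PySem.Str.split₀ line) 2 with
      | none => none   -- IndexError: line.split()[2] out of range (excluded by Pre_)
      | some k => pvALoop rest (d.insert k []) (some k)
    else
      match key with
      | none => pvALoop rest d none
      | some k =>
        let args := (PySem.Str.splitMax? line ":" 1).getD []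
        let args2 := if args.length ≠ 2 then (PySem.Str.splitMax? line "=" 1).getD [] else args
        if args2.length ≠ 2 then pvALoop rest d (some k)
        else pvALoop rest
          (d.modify k [] (fun l => l ++
            [(PySem.Str.strip (PySem.List.pyGetD args2 0 ""), PySem.Str.strip (PySem.List.pyGetD args2 1 ""))]))
          (some k)

def parse_internals (lines : List String) : List (String × List (String × String)) :=
  match pvALoop lines PySem.Dict.empty none with
  | some d => d.items
  | none => []   -- unreachable under Pre_ (Python raises IndexError there)

-- ===== PORT B =====
def pvParseLine (line : String) : Option (String × String) :=
  let args := (PySem.Str.splitMax? line ":" 1).getD []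
  let args2 := if args.length ≠ 2 then (PySem.Str.splitMax? line "=" 1).getD [] else args
  if args2.length ≠ 2 then none
  else some (PySem.Str.strip (PySem.List.pyGetD args2 0 ""), PySem.Str.strip (PySem.List.pyGetD args2 1 ""))

def pvNotNode (l : String) : Bool := !(PySem.Str.startswith l "Node")

-- Source B's outer while-loop: head is a "Node" header, the body is the run of
-- non-header lines after it.
def pvBGo : List String → PySem.Dict String (List (String × String)) →
    Option (PySem.Dict String (List (String × String)))
  | [], d => some d
  | line :: rest, d =>
    match PySem.List.pyGet? (PySem.Str.split₀ line) 2 with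
    | none => none   -- IndexError (excluded by Pre_)
    | some k =>
      pvBGo (rest.dropWhile pvNotNode)
        (d.insert k ((rest.takeWhile pvNotNode).filterMap pvParseLine))
  termination_by ls _ => ls.length
  decreasing_by simp only [List.length_cons]; exact Nat.lt_succ_of_le (List.length_dropWhile_le _ _)

def parse_internals_alt (lines : List String) : List (String × List (String × String)) :=
  match pvBGo (lines.dropWhile pvNotNode) PySem.Dict.empty with
  | some d => d.items
  | none => []

-- ===== PRECONDITION & SPEC =====
-- Pre_ excludes exactly the inputs where Python A raises IndexError:
-- a line starting with "Node" whose whitespace split has fewer than 3 words.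
def Pre_parse_internals (lines : List String) : Prop :=
  ∀ line ∈ lines, PySem.Str.startswith line "Node" = true → 3 ≤ (PySem.Str.split₀ line).length
instance (lines : List String) : Decidable (Pre_parse_internals lines) := by
  unfold Pre_parse_internals; infer_instance

def pvWitness_parse_internals : List String :=
  ["junk", "Node 12 host1", " load : 3 ", "sched=fast", "plain", "Node 13 host2", "jobs: 0"]

def Spec_parse_internals (lines : List String) (out : List (String × List (String × String))) : Prop := out = parse_internals_alt lines
instance (lines : List String) (out : List (String × List (String × String))) : Decidable (Spec_parse_internals lines out) := by unfold Spec_parse_internals; infer_instance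

-- ===== CLAIM (what is proved, stated in full; the proofs are below) =====
def Claim_equal_parse_internals : Prop := ∀ (lines : List String), Dom_parse_internals lines → Pre_parse_internals lines → Spec_parse_internals lines (parse_internals lines)

-- ===== LEMMAS AND PROOFS =====

-- A's body step at a non-"Node" line with key set is one `pvParseLine` step.
theorem pvALoop_body_step (line : String) (rest : List String)
    (d : PySem.Dict String (List (String × String))) (k : String)
    (h : pvNotNode line = true) :
    pvALoop (line :: rest) d (some k) =
      match pvParseLine line with
      | none => pvALoop rest d (some k)
      | some p => pvALoop rest (d.modify k [] (fun l => l ++ [p])) (some k) := by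
  simp only [pvNotNode, Bool.not_eq_true'] at h
  simp only [pvALoop, pvParseLine, h, Bool.false_eq_true, if_false]
  split_ifs with h2 <;> simp

-- modify at a just-inserted key is an insert of the updated value
theorem pvModify_insert (d : PySem.Dict String (List (String × String)))
    (k : String) (acc : List (String × String)) (f : List (String × String) → List (String × String)) :
    (d.insert k acc).modify k [] f = d.insert k (f acc) := by
  simp [PySem.Dict.modify, PySem.Dict.getD_insert_self, PySem.Dict.insert_insert_self]

-- running A through a block body folds the body's parses onto the key's list
theorem pvALoop_block (body : List String) :
    ∀ (rest : List String) (d : PySem.Dict String (List (String × String)))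
      (k : String) (acc : List (String × String)),
    (∀ l ∈ body, pvNotNode l = true) →
    pvALoop (body ++ rest) (d.insert k acc) (some k) =
      pvALoop rest (d.insert k (acc ++ body.filterMap pvParseLine)) (some k) := by
  induction body with
  | nil => intro rest d k acc _; simp
  | cons hd tl ih =>
    intro rest d k acc hall
    have hhd : pvNotNode hd = true := hall hd (by simp)
    have htl : ∀ l ∈ tl, pvNotNode l = true := fun l hl => hall l (by simp [hl])
    rw [List.cons_append, pvALoop_body_step hd (tl ++ rest) _ k hhd]
    cases hp : pvParseLine hd with
    | none => simp [ih rest d k acc htl, hp]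
    | some p =>
      dsimp only
      rw [pvModify_insert]
      rw [ih rest d k (acc ++ [p]) htl]
      simp [hp]

-- with no key yet, A skips everything up to the first "Node" header
theorem pvALoop_skip (lines : List String) (d : PySem.Dict String (List (String × String))) :
    pvALoop lines d none = pvALoop (lines.dropWhile pvNotNode) d none := by
  induction lines with
  | nil => simp
  | cons hd tl ih =>
    by_cases h : pvNotNode hd = true
    · have h' : PySem.Str.startswith hd "Node" = false := by
        simpa [pvNotNode, Bool.not_eq_true'] using h
      rw [List.dropWhile_cons_of_pos h]
      have hstep : pvALoop (hd :: tl) d none = pvALoop tl d none := by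
        simp only [pvALoop, h', Bool.false_eq_true, if_false]
      rw [hstep]; exact ih
    · rw [List.dropWhile_cons_of_neg h]

-- main: on a header-led (or empty) list, A's scan equals B's block recursion
theorem pvMain : ∀ (n : Nat) (ls : List String), ls.length ≤ n →
    (ls = [] ∨ ∃ h t, ls = h :: t ∧ pvNotNode h = false) →
    ∀ (d : PySem.Dict String (List (String × String))) (key : Option String),
    pvALoop ls d key = pvBGo ls d := by
  intro n
  induction n with
  | zero =>
    intro ls hlen _ d key
    have : ls = [] := List.length_eq_zero_iff.mp (Nat.le_zero.mp hlen)
    subst this; cases key <;> simp [pvALoop, pvBGo]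
  | succ m ih =>
    intro ls hlen hshape d key
    cases hshape with
    | inl h => subst h; cases key <;> simp [pvALoop, pvBGo]
    | inr h =>
      obtain ⟨hd, tl, rfl, hnn⟩ := h
      have hsw : PySem.Str.startswith hd "Node" = true := by
        simpa [pvNotNode, Bool.not_eq_false] using hnn
      cases key <;>
      · simp only [pvALoop, pvBGo, hsw, if_true]
        cases hk : PySem.List.pyGet? (PySem.Str.split₀ hd) 2 with
        | none => rfl
        | some k =>
          dsimp only
          have hsplit : tl.takeWhile pvNotNode ++ tl.dropWhile pvNotNode = tl :=
            List.takeWhile_append_dropWhile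
          have hblk := pvALoop_block (tl.takeWhile pvNotNode) (tl.dropWhile pvNotNode)
            d k [] (fun l hl => List.mem_takeWhile_imp hl)
          rw [hsplit] at hblk
          rw [hblk]
          simp only [List.nil_append]
          apply ih
          · have h1 : (tl.dropWhile pvNotNode).length ≤ tl.length := List.length_dropWhile_le _ _
            have h2 : tl.length + 1 ≤ m + 1 := by simpa using hlen
            omega
          · cases hdw : tl.dropWhile pvNotNode with
            | nil => exact Or.inl rfl
            | cons x xs =>
              refine Or.inr ⟨x, xs, rfl, ?_⟩
              have hx : ¬ pvNotNode x = true := by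
                have := List.head?_dropWhile_not pvNotNode tl
                rw [hdw] at this; simpa using this
              simpa using hx

-- ===== VERDICT (by name: the statement is the Claim_ definition above) =====
theorem parse_internals_spec : Claim_equal_parse_internals := by
  intro lines _ _
  unfold Spec_parse_internals parse_internals parse_internals_alt
  rw [pvALoop_skip, pvMain (lines.dropWhile pvNotNode).length _ le_rfl]
  cases hdw : lines.dropWhile pvNotNode with
  | nil => exact Or.inl rfl
  | cons x xs =>
    refine Or.inr ⟨x, xs, rfl, ?_⟩
    have hx := List.head?_dropWhile_not pvNotNode lines
    rw [hdw] at hx; simpa using hx
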